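-- pv_equiv track=rewrite | github.com/kookmin-sw/2026-capstone-2026-10 | AIchitect/app/services/rules_service.py | build_required_blocks
-- ===== SOURCE A (Python) =====
-- from typing import Any
--
-- def get_zone_priority(space_name: str, concepts: dict[str, Any]) -> int:
--     """
--     배치 우선순위:
--     entrance(0) -> public(1) -> semi_private(2) -> private(3)
--     """
--     if space_name == "entrance":
--         return 0
--
--     zone = concepts.get(space_name, {}).get("zone", "private")
--     order = {
--         "public": 1,
--         "semi_private": 2,
--         "private": 3
--     }
--     return order.get(zone, 3)
--
-- def build_required_blocks(spaces: dict[str, int], concepts: dict[str, Any]) -> list[str]: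
--     """
--     entrance를 맨 앞에 두고,
--     public -> semi_private -> private 순으로 정렬
--     """
--     ordered_space_names = sorted(spaces.keys(), key=lambda x: get_zone_priority(x, concepts))
--
--     blocks: list[str] = ["entrance"]
--     for space_name in ordered_space_names:
--         count = spaces[space_name]
--         for _ in range(count):
--             blocks.append(space_name)
--
--     return blocks
-- ===== SOURCE B (Python) =====
-- def build_required_blocks(spaces, concepts):
--     def prio(name):
--         if name == "entrance":
--             return 0
--         zone = concepts.get(name, {}).get("zone", "private")
--         return {"public": 1, "semi_private": 2}.get(zone, 3)
--
--     buckets = ([], [], [], [])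
--     for name in spaces:
--         buckets[prio(name)].append(name)
--
--     out = ["entrance"]
--     for bucket in buckets:
--         for name in bucket:
--             out += [name] * spaces[name]
--     return out
-- ===== Notes on version B (the rewrite author's own statement) =====
-- stated objective: alternative
-- what changed: Replaces the sorted-by-priority-key pass with a single-pass partition of the keys into four fixed priority buckets, then emits 'entrance' followed by each bucket's names repeated by their counts via list multiplication instead of an inner append loop.
import Mathlib
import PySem

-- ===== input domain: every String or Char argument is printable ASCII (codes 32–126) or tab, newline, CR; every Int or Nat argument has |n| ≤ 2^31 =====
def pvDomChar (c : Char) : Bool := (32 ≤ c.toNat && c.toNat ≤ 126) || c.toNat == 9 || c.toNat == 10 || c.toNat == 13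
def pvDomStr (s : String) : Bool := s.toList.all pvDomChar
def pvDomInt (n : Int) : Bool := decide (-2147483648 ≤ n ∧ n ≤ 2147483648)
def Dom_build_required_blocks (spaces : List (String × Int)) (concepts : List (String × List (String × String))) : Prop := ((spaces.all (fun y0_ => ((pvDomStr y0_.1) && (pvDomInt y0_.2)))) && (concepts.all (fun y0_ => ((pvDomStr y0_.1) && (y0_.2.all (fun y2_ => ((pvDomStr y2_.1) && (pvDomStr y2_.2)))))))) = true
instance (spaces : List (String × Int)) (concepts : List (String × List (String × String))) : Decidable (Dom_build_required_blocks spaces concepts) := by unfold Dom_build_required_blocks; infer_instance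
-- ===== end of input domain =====

-- B replaces A's stable sort by a priority key with a one-pass partition into four
-- priority buckets followed by a concatenation/repetition pass (alternative algorithm).

-- ===== PORT A =====
-- get_zone_priority(space_name, concepts)
def pvPrioA (c : PySem.Dict String (List (String × String))) (name : String) : Int :=
  if name == "entrance" then 0
  else
    let zone : String :=
      match c.get? name with
      | some m => (PySem.Dict.ofList m).getD "zone" "private"
      | none => "private"
    (PySem.Dict.ofList [("public", (1 : Int)), ("semi_private", 2), ("private", 3)]).getD zone 3

def build_required_blocks (spaces : List (String × Int)) (concepts : List (String × List (String × String))) : List String :=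
  let d := PySem.Dict.ofList spaces
  let c := PySem.Dict.ofList concepts
  let ordered := PySem.List.sorted d.keys (fun x => pvPrioA c x) false
  -- spaces[space_name]: name comes from d.keys, so the lookup always succeeds; getD's default is unreachable
  ordered.foldl
    (fun blocks name =>
      (PySem.List.pyRange 0 (d.getD name 0) 1).foldl (fun b _ => b ++ [name]) blocks)
    ["entrance"]

-- ===== PORT B =====
-- B's local prio(name)
def pvPrioB (c : PySem.Dict String (List (String × String))) (name : String) : Int :=
  if name == "entrance" then 0
  else
    let zone : String :=
      match c.get? name with
      | some m => (PySem.Dict.ofList m).getD "zone" "private"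
      | none => "private"
    (PySem.Dict.ofList [("public", (1 : Int)), ("semi_private", 2)]).getD zone 3

-- buckets[prio(name)].append(name)
def pvBucketStep (c : PySem.Dict String (List (String × String)))
    (b : List String × List String × List String × List String) (name : String) :
    List String × List String × List String × List String :=
  let p := pvPrioB c name
  if p == 0 then (b.1 ++ [name], b.2.1, b.2.2.1, b.2.2.2)
  else if p == 1 then (b.1, b.2.1 ++ [name], b.2.2.1, b.2.2.2)
  else if p == 2 then (b.1, b.2.1, b.2.2.1 ++ [name], b.2.2.2)
  else (b.1, b.2.1, b.2.2.1, b.2.2.2 ++ [name])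

def build_required_blocks_alt (spaces : List (String × Int)) (concepts : List (String × List (String × String))) : List String :=
  let d := PySem.Dict.ofList spaces
  let c := PySem.Dict.ofList concepts
  let buckets := d.keys.foldl (pvBucketStep c) ([], [], [], [])
  -- out += [name] * spaces[name]  (name comes from d.keys, so the lookup succeeds)
  "entrance" ::
    (buckets.1 ++ buckets.2.1 ++ buckets.2.2.1 ++ buckets.2.2.2).flatMap
      (fun name => List.replicate (d.getD name 0).toNat name)

-- ===== PRECONDITION & SPEC =====
def Spec_build_required_blocks (spaces : List (String × Int)) (concepts : List (String × List (String × String))) (out : List String) : Prop := out = build_required_blocks_alt spaces concepts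
instance (spaces : List (String × Int)) (concepts : List (String × List (String × String))) (out : List String) : Decidable (Spec_build_required_blocks spaces concepts out) := by unfold Spec_build_required_blocks; infer_instance

-- ===== CLAIM (what is proved, stated in full; the proofs are below) =====
def Claim_equal_build_required_blocks : Prop := ∀ (spaces : List (String × Int)) (concepts : List (String × List (String × String))), Dom_build_required_blocks spaces concepts → Spec_build_required_blocks spaces concepts (build_required_blocks spaces concepts)

-- ===== LEMMAS AND PROOFS =====

-- the two priority helpers agree
lemma prio_eq (c : PySem.Dict String (List (String × String))) (n : String) :
    pvPrioA c n = pvPrioB c n := by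
  unfold pvPrioA pvPrioB
  by_cases h : n == "entrance"
  · simp [h]
  · simp only [h, Bool.false_eq_true, if_false]
    set zone : String :=
      match c.get? n with
      | some m => (PySem.Dict.ofList m).getD "zone" "private"
      | none => "private" with hz
    by_cases h1 : zone = "public"
    · simp [h1, PySem.Dict.ofList, PySem.Dict.getD, PySem.Dict.get?, PySem.Dict.update,
        PySem.Dict.insert, PySem.Dict.empty, PySem.Dict.contains]
    · by_cases h2 : zone = "semi_private"
      · simp [h2, PySem.Dict.ofList, PySem.Dict.getD, PySem.Dict.get?, PySem.Dict.update,
          PySem.Dict.insert, PySem.Dict.empty, PySem.Dict.contains]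
      · by_cases h3 : zone = "private"
        · simp [h3, PySem.Dict.ofList, PySem.Dict.getD, PySem.Dict.get?, PySem.Dict.update,
            PySem.Dict.insert, PySem.Dict.empty, PySem.Dict.contains]
        · have h1' : ¬("public" = zone) := fun e => h1 e.symm
          have h2' : ¬("semi_private" = zone) := fun e => h2 e.symm
          have h3' : ¬("private" = zone) := fun e => h3 e.symm
          simp [PySem.Dict.ofList, PySem.Dict.getD, PySem.Dict.get?, PySem.Dict.update,
            PySem.Dict.insert, PySem.Dict.empty, PySem.Dict.contains, h1', h2', h3']

lemma prioB_range (c : PySem.Dict String (List (String × String))) (n : String) :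
    pvPrioB c n = 0 ∨ pvPrioB c n = 1 ∨ pvPrioB c n = 2 ∨ pvPrioB c n = 3 := by
  unfold pvPrioB
  by_cases h : n == "entrance"
  · simp [h]
  · simp only [h, Bool.false_eq_true, if_false]
    set zone : String :=
      match c.get? n with
      | some m => (PySem.Dict.ofList m).getD "zone" "private"
      | none => "private" with hz
    by_cases h1 : zone = "public"
    · simp [h1, PySem.Dict.ofList, PySem.Dict.getD, PySem.Dict.get?, PySem.Dict.update,
        PySem.Dict.insert, PySem.Dict.empty, PySem.Dict.contains]
    · by_cases h2 : zone = "semi_private"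
      · simp [h2, PySem.Dict.ofList, PySem.Dict.getD, PySem.Dict.get?, PySem.Dict.update,
          PySem.Dict.insert, PySem.Dict.empty, PySem.Dict.contains]
      · have h1' : ¬("public" = zone) := fun e => h1 e.symm
        have h2' : ¬("semi_private" = zone) := fun e => h2 e.symm
        simp [PySem.Dict.ofList, PySem.Dict.getD, PySem.Dict.get?, PySem.Dict.update,
          PySem.Dict.insert, PySem.Dict.empty, PySem.Dict.contains, h1', h2']

-- insertBy skips a prefix of elements x does not go before
lemma insertBy_append_not {α : Type} (pred : α → α → Bool) (x : α) (l1 l2 : List α)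
    (h : ∀ y ∈ l1, pred x y = false) :
    PySem.List.insertBy pred x (l1 ++ l2) = l1 ++ PySem.List.insertBy pred x l2 := by
  induction l1 with
  | nil => simp
  | cons a t ih =>
      have ha : pred x a = false := h a (by simp)
      simp [PySem.List.insertBy, ha, ih (fun y hy => h y (by simp [hy]))]

-- insertBy puts x in front when it goes before everything
lemma insertBy_all {α : Type} (pred : α → α → Bool) (x : α) (l : List α)
    (h : ∀ y ∈ l, pred x y = true) :
    PySem.List.insertBy pred x l = x :: l := by
  cases l with
  | nil => simp [PySem.List.insertBy]
  | cons a t => simp [PySem.List.insertBy, h a (by simp)]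

-- a stable sort by a key taking values in {0,1,2,3} is the concatenation of the four filters
lemma sorted_four_buckets {α : Type} (xs : List α) (key : α → Int)
    (h : ∀ x ∈ xs, key x = 0 ∨ key x = 1 ∨ key x = 2 ∨ key x = 3) :
    PySem.List.sorted xs key false =
      xs.filter (fun x => key x == 0) ++ xs.filter (fun x => key x == 1) ++
      xs.filter (fun x => key x == 2) ++ xs.filter (fun x => key x == 3) := by
  rw [PySem.List.sorted_eq_foldl_insertBy]
  induction xs using List.reverseRecOn with
  | nil => rfl
  | append_singleton ys x ih =>
      have hys : ∀ y ∈ ys, key y = 0 ∨ key y = 1 ∨ key y = 2 ∨ key y = 3 :=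
        fun y hy => h y (by simp [hy])
      rw [List.foldl_append, List.foldl_cons, List.foldl_nil, ih hys]
      have m0 : ∀ y ∈ ys.filter (fun x => key x == 0), key y = 0 := by
        intro y hy; simpa using (List.of_mem_filter hy)
      have m1 : ∀ y ∈ ys.filter (fun x => key x == 1), key y = 1 := by
        intro y hy; simpa using (List.of_mem_filter hy)
      have m2 : ∀ y ∈ ys.filter (fun x => key x == 2), key y = 2 := by
        intro y hy; simpa using (List.of_mem_filter hy)
      have m3 : ∀ y ∈ ys.filter (fun x => key x == 3), key y = 3 := by
        intro y hy; simpa using (List.of_mem_filter hy)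
      rcases h x (by simp) with hx | hx | hx | hx
      · rw [List.append_assoc, List.append_assoc,
            insertBy_append_not _ _ _ _ (by intro y hy; simp [hx, m0 y hy]),
            insertBy_all _ _ _ (by
              intro y hy
              simp only [List.mem_append] at hy
              rcases hy with hy | hy | hy
              · simp [hx, m1 y hy]
              · simp [hx, m2 y hy]
              · simp [hx, m3 y hy])]
        simp [List.filter_append, hx]
      · rw [List.append_assoc, List.append_assoc,
            insertBy_append_not _ _ _ _ (by intro y hy; simp [hx, m0 y hy]),
            insertBy_append_not _ _ _ _ (by intro y hy; simp [hx, m1 y hy]),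
            insertBy_all _ _ _ (by
              intro y hy
              simp only [List.mem_append] at hy
              rcases hy with hy | hy
              · simp [hx, m2 y hy]
              · simp [hx, m3 y hy])]
        simp [List.filter_append, hx]
      · rw [List.append_assoc, List.append_assoc,
            insertBy_append_not _ _ _ _ (by intro y hy; simp [hx, m0 y hy]),
            insertBy_append_not _ _ _ _ (by intro y hy; simp [hx, m1 y hy]),
            insertBy_append_not _ _ _ _ (by intro y hy; simp [hx, m2 y hy]),
            insertBy_all _ _ _ (by intro y hy; simp [hx, m3 y hy])]
        simp [List.filter_append, hx]
      · rw [List.append_assoc, List.append_assoc,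
            insertBy_append_not _ _ _ _ (by intro y hy; simp [hx, m0 y hy]),
            insertBy_append_not _ _ _ _ (by intro y hy; simp [hx, m1 y hy]),
            insertBy_append_not _ _ _ _ (by intro y hy; simp [hx, m2 y hy]),
            PySem.List.insertBy_of_forall_not_before _ _ _ (by intro y hy; simp [hx, m3 y hy])]
        simp [List.filter_append, hx]

-- B's bucket fold computes the four filters
lemma buckets_eq (c : PySem.Dict String (List (String × String))) (xs : List String)
    (b0 b1 b2 b3 : List String) :
    xs.foldl (pvBucketStep c) (b0, b1, b2, b3) =
      (b0 ++ xs.filter (fun n => pvPrioB c n == 0),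
       b1 ++ xs.filter (fun n => pvPrioB c n == 1),
       b2 ++ xs.filter (fun n => pvPrioB c n == 2),
       b3 ++ xs.filter (fun n => pvPrioB c n == 3)) := by
  induction xs generalizing b0 b1 b2 b3 with
  | nil => simp
  | cons a t ih =>
      rcases prioB_range c a with ha | ha | ha | ha <;>
        simp [pvBucketStep, ha, ih, List.append_assoc]

-- the inner append loop of A emits a replicate
lemma foldl_const_append {α β : Type} (l : List β) (s : α) (init : List α) :
    l.foldl (fun b _ => b ++ [s]) init = init ++ List.replicate l.length s := by
  induction l generalizing init with
  | nil => simp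
  | cons a t ih => simp [ih, List.replicate_succ, List.append_assoc]

-- A's outer emission loop, as a flatMap of replicates
lemma loopA_eq (d : PySem.Dict String Int) (l : List String) :
    l.foldl
      (fun blocks name =>
        (PySem.List.pyRange 0 (d.getD name 0) 1).foldl (fun b _ => b ++ [name]) blocks)
      ["entrance"] =
    "entrance" :: l.flatMap (fun name => List.replicate (d.getD name 0).toNat name) := by
  rw [PySem.List.foldl_congr_mem l
        (fun blocks name =>
          (PySem.List.pyRange 0 (d.getD name 0) 1).foldl (fun b _ => b ++ [name]) blocks)
        (fun blocks name => blocks ++ List.replicate (d.getD name 0).toNat name)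
        ["entrance"]
        (by
          intro acc x _
          dsimp only
          rw [foldl_const_append, PySem.List.length_pyRange_one]
          simp)]
  rw [PySem.List.foldl_append_eq_flatMap]
  simp

-- ===== VERDICT (by name: the statement is the Claim_ definition above) =====
theorem build_required_blocks_spec : Claim_equal_build_required_blocks := by
  intro spaces concepts _
  unfold Spec_build_required_blocks build_required_blocks build_required_blocks_alt
  dsimp only
  set d := PySem.Dict.ofList spaces with hd
  set c := PySem.Dict.ofList concepts with hc
  have hkey : (fun x => pvPrioA c x) = (fun x => pvPrioB c x) := funext (prio_eq c)
  have hsorted :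
      PySem.List.sorted d.keys (fun x => pvPrioA c x) false =
        d.keys.filter (fun n => pvPrioB c n == 0) ++ d.keys.filter (fun n => pvPrioB c n == 1) ++
        d.keys.filter (fun n => pvPrioB c n == 2) ++ d.keys.filter (fun n => pvPrioB c n == 3) := by
    rw [hkey]
    exact sorted_four_buckets d.keys (fun x => pvPrioB c x) (fun x _ => prioB_range c x)
  rw [hsorted, buckets_eq, loopA_eq]
  simp [List.append_assoc]
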